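-- pv_equiv track=rewrite | github.com/dhyey-69/LeetCode | 3623.py | xyz
-- ===== SOURCE A (Python) =====
-- def xyz(points):
--     MOD = 10**9 + 7
--
--     ycount = {}
--     for x, y in points:
--         if y in ycount:
--             ycount[y] += 1
--         else:
--             ycount[y] = 1
--
--     hs = []
--     for k in ycount.values():
--         if k >= 2:
--             hs.append(k * (k - 1) // 2)
--
--     n = len(hs)
--     if n < 2:
--         return 0
--
--     total_h = 0
--     total_h_sq = 0
--     for h in hs:
--         total_h = (total_h + h) % MOD
--         total_h_sq = (total_h_sq + (h * h) % MOD) % MOD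
--
--     ans = (total_h * total_h - total_h_sq) % MOD
--
--     inv2 = (MOD + 1) // 2
--     ans = (ans * inv2) % MOD
--
--     return ans
-- ===== SOURCE B (Python) =====
-- def xyz(points):
--     MOD = 10**9 + 7
--
--     ycount = {}
--     for _, y in points:
--         ycount[y] = ycount.get(y, 0) + 1
--
--     hs = [k * (k - 1) // 2 for k in ycount.values() if k >= 2]
--
--     ans = 0
--     prefix = 0
--     for h in hs:
--         ans = (ans + h * prefix) % MOD
--         prefix = (prefix + h) % MOD
--     return ans
-- ===== Notes on version B (the rewrite author's own statement) =====
-- stated objective: alternative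
-- what changed: Phase 2's closed form ((Sum h)^2 - Sum h^2)/2 via a modular inverse of 2 (with an n<2 guard) is replaced by a single incremental pass accumulating h*prefix pairwise products mod 10^9+7, needing no inverse and no guard.
import Mathlib
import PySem

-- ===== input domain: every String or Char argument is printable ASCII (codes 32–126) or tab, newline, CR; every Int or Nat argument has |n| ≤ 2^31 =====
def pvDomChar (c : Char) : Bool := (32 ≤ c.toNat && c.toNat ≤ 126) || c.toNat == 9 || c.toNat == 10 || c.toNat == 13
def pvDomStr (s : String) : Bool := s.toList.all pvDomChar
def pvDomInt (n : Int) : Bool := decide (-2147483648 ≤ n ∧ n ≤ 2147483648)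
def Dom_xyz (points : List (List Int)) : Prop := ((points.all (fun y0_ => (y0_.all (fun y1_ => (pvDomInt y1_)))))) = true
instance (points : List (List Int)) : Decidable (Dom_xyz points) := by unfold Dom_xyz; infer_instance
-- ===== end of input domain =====

-- B replaces A's closed-form ((Σh)²−Σh²)·inv2 (mod inverse, n<2 guard) by one incremental
-- pass accumulating h·prefix pairwise products mod 10^9+7; same O(n) cost (objective: alternative).

-- ===== PORT A =====
def xyz (points : List (List Int)) : Int :=
  let M : Int := 1000000007
  let ycount : PySem.Dict Int Int := points.foldl (fun d p =>
    match p with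
    | [] => d
    | [_] => d
    | [_, y] =>
        match d.get? y with
        | some v => d.insert y (v + 1)
        | none => d.insert y 1
    | _ :: _ :: _ :: _ => d) PySem.Dict.empty
  let hs : List Int := ycount.values.foldl (fun l k =>
    if k ≥ 2 then l ++ [PySem.Int.floordiv (k * (k - 1)) 2] else l) []
  let n := hs.length
  if n < 2 then 0
  else
    let st := hs.foldl (fun (t : Int × Int) h =>
      (PySem.Int.mod (t.1 + h) M, PySem.Int.mod (t.2 + PySem.Int.mod (h * h) M) M)) (0, 0)
    let ans := PySem.Int.mod (st.1 * st.1 - st.2) M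
    let inv2 := PySem.Int.floordiv (M + 1) 2
    PySem.Int.mod (ans * inv2) M

-- ===== PORT B =====
def xyz_alt (points : List (List Int)) : Int :=
  let M : Int := 1000000007
  let ycount : PySem.Dict Int Int := points.foldl (fun d p =>
    match p with
    | [_, y] => d.insert y (d.getD y 0 + 1)
    | _ => d) PySem.Dict.empty
  let hs : List Int := (ycount.values.filter (fun k => k ≥ 2)).map
    (fun k => PySem.Int.floordiv (k * (k - 1)) 2)
  let st := hs.foldl (fun (t : Int × Int) h =>
    (PySem.Int.mod (t.1 + h * t.2) M, PySem.Int.mod (t.2 + h) M)) (0, 0)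
  st.1

-- ===== PRECONDITION & SPEC =====
-- Pre_ excludes rows that are not 2-element lists, where Python A's 'for x, y in points' raises ValueError.
def Pre_xyz (points : List (List Int)) : Prop := ∀ p ∈ points, p.length = 2
instance (points : List (List Int)) : Decidable (Pre_xyz points) := by unfold Pre_xyz; infer_instance
def pvWitness_xyz : List (List Int) := [[0, 1], [2, 1], [3, 1], [0, 5], [9, 5]]

def Spec_xyz (points : List (List Int)) (out : Int) : Prop := out = xyz_alt points
instance (points : List (List Int)) (out : Int) : Decidable (Spec_xyz points out) := by unfold Spec_xyz; infer_instance

-- ===== CLAIM (what is proved, stated in full; the proofs are below) =====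
def Claim_equal_xyz : Prop := ∀ (points : List (List Int)), Dom_xyz points → Pre_xyz points → Spec_xyz points (xyz points)

-- ===== LEMMAS AND PROOFS =====

-- exact (unreduced) sum of pairwise products of l, each element also multiplied against a running prefix seeded by S
def pairAcc (S : Int) : List Int → Int
  | [] => 0
  | h :: t => h * S + pairAcc (S + h) t

-- A's membership-test counting step and B's get-with-default counting step are the same dict update
lemma dict_step_eq :
    (fun (d : PySem.Dict Int Int) (p : List Int) =>
      match p with
      | [] => d
      | [_] => d
      | [_, y] =>
          match d.get? y with
          | some v => d.insert y (v + 1)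
          | none => d.insert y 1
      | _ :: _ :: _ :: _ => d)
    = (fun (d : PySem.Dict Int Int) (p : List Int) =>
      match p with
      | [_, y] => d.insert y (d.getD y 0 + 1)
      | _ => d) := by
  funext d p
  match p with
  | [] => rfl
  | [_] => rfl
  | [x, y] =>
      cases hg : d.get? y <;>
        simp [PySem.Dict.getD_eq_get?_getD, hg]
  | _ :: _ :: _ :: _ => rfl

-- the double of pairAcc is A's closed form, exactly over ℤ
lemma pairAcc_sq : ∀ (l : List Int) (S : Int),
    2 * pairAcc S l = (S + l.sum) ^ 2 - S ^ 2 - (l.map (fun h => h * h)).sum := by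
  intro l
  induction l with
  | nil => intro S; simp [pairAcc]
  | cons h t ih =>
      intro S
      simp only [pairAcc, List.sum_cons, List.map_cons]
      linear_combination ih (S + h)

lemma loopA : ∀ (l : List Int) (a q S Q : Int),
    a = S % 1000000007 → q = Q % 1000000007 →
    l.foldl (fun (t : Int × Int) h =>
        (PySem.Int.mod (t.1 + h) 1000000007,
         PySem.Int.mod (t.2 + PySem.Int.mod (h * h) 1000000007) 1000000007)) (a, q)
      = ((S + l.sum) % 1000000007, (Q + (l.map (fun h => h * h)).sum) % 1000000007) := by
  intro l
  induction l with
  | nil => intro a q S Q ha hq; simp [ha, hq]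
  | cons h t ih =>
      intro a q S Q ha hq
      simp only [List.foldl_cons, List.sum_cons, List.map_cons]
      rw [PySem.Int.mod_eq_emod_of_pos (by norm_num), PySem.Int.mod_eq_emod_of_pos (by norm_num),
          PySem.Int.mod_eq_emod_of_pos (by norm_num),
          ih _ _ (S + h) (Q + h * h) ?_ ?_]
      · ring_nf
      · rw [ha]
        exact Int.ModEq.add_right h (Int.emod_emod_of_dvd S dvd_rfl)
      · rw [hq]
        exact Int.ModEq.add (Int.emod_emod_of_dvd Q dvd_rfl) (Int.emod_emod_of_dvd (h * h) dvd_rfl)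

lemma loopB : ∀ (l : List Int) (a s A S : Int),
    a = A % 1000000007 → s = S % 1000000007 →
    l.foldl (fun (t : Int × Int) h =>
        (PySem.Int.mod (t.1 + h * t.2) 1000000007,
         PySem.Int.mod (t.2 + h) 1000000007)) (a, s)
      = ((A + pairAcc S l) % 1000000007, (S + l.sum) % 1000000007) := by
  intro l
  induction l with
  | nil => intro a s A S ha hs; simp [ha, hs, pairAcc]
  | cons h t ih =>
      intro a s A S ha hs
      simp only [List.foldl_cons, List.sum_cons, pairAcc]
      rw [PySem.Int.mod_eq_emod_of_pos (by norm_num), PySem.Int.mod_eq_emod_of_pos (by norm_num),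
          ih _ _ (A + h * S) (S + h) ?_ ?_]
      · ring_nf
      · rw [ha, hs]
        exact Int.ModEq.add (Int.emod_emod_of_dvd A dvd_rfl)
          (Int.ModEq.mul_left h (Int.emod_emod_of_dvd S dvd_rfl))
      · rw [hs]
        exact Int.ModEq.add_right h (Int.emod_emod_of_dvd S dvd_rfl)

-- A's guarded closed form equals B's incremental pass, for ANY list of h-values
lemma phase2 (hs : List Int) :
    (if hs.length < 2 then (0 : Int)
     else
       let st := hs.foldl (fun (t : Int × Int) h =>
         (PySem.Int.mod (t.1 + h) 1000000007,
          PySem.Int.mod (t.2 + PySem.Int.mod (h * h) 1000000007) 1000000007)) (0, 0)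
       PySem.Int.mod (PySem.Int.mod (st.1 * st.1 - st.2) 1000000007 *
         PySem.Int.floordiv (1000000007 + 1) 2) 1000000007)
    = (hs.foldl (fun (t : Int × Int) h =>
        (PySem.Int.mod (t.1 + h * t.2) 1000000007,
         PySem.Int.mod (t.2 + h) 1000000007)) (0, 0)).1 := by
  rw [loopB hs 0 0 0 0 (by simp) (by simp)]
  by_cases hl : hs.length < 2
  · rw [if_pos hl]
    match hs, hl with
    | [], _ => simp [pairAcc]
    | [h], _ => simp [pairAcc]
  · rw [if_neg hl, loopA hs 0 0 0 0 (by simp) (by simp)]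
    simp only [zero_add]
    rw [PySem.Int.mod_eq_emod_of_pos (by norm_num), PySem.Int.mod_eq_emod_of_pos (by norm_num),
        show PySem.Int.floordiv (1000000007 + 1) 2 = 500000004 from by decide]
    have mA : ∀ x : Int, Int.ModEq 1000000007 (x % 1000000007) x := fun x =>
      Int.emod_emod_of_dvd x dvd_rfl
    set Sm := hs.sum with hSm
    set Qm := (hs.map (fun h => h * h)).sum with hQm
    set P := pairAcc 0 hs with hP
    have key : 2 * P = Sm ^ 2 - Qm := by
      rw [hP, pairAcc_sq hs 0, ← hSm, ← hQm]; ring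
    clear_value Sm Qm P
    have e1 : Int.ModEq 1000000007 (Sm % 1000000007 * (Sm % 1000000007) - Qm % 1000000007)
        (Sm * Sm - Qm) :=
      Int.ModEq.sub ((mA Sm).mul (mA Sm)) (mA Qm)
    have e2 : Int.ModEq 1000000007
        ((Sm % 1000000007 * (Sm % 1000000007) - Qm % 1000000007) % 1000000007 * 500000004)
        ((Sm * Sm - Qm) * 500000004) :=
      Int.ModEq.mul_right _ ((mA _).trans e1)
    have e3 : (Sm * Sm - Qm) * 500000004 = P * 1000000007 + P := by
      linear_combination (-500000004 : Int) * key
    have e4 : Int.ModEq 1000000007 (P * 1000000007 + P) P := by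
      have h0 : (P * 1000000007 + P) % 1000000007 = (0 + P) % 1000000007 :=
        Int.ModEq.add_right P (Int.modEq_zero_iff_dvd.mpr ⟨P, mul_comm P 1000000007⟩)
      rw [zero_add] at h0; exact h0
    exact e2.trans (by rw [e3]; exact e4)

-- ===== VERDICT (by name: the statement is the Claim_ definition above) =====
theorem xyz_spec : Claim_equal_xyz := by
  intro points _ _
  show xyz points = xyz_alt points
  simp only [xyz, xyz_alt]
  rw [dict_step_eq]
  rw [show (fun (l : List Int) (k : Int) =>
        if k ≥ 2 then l ++ [PySem.Int.floordiv (k * (k - 1)) 2] else l)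
      = (fun (l : List Int) (k : Int) =>
        if (fun k : Int => decide (k ≥ 2)) k = true
        then l ++ [(fun k : Int => PySem.Int.floordiv (k * (k - 1)) 2) k] else l) from by
    funext l k; simp]
  rw [PySem.List.foldl_append_if]
  simp only [List.nil_append]
  exact phase2 _
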